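-- pv_equiv track=rewrite | github.com/N1cecode/IEEEXtreme | 18.0/Sierpinski/draw.py | sierpinski
-- ===== SOURCE A (Python) =====
-- values = [3, 6, 12, 24, 48, 96, 192, 384, 768, 1536, 3072, 6144, 12288, 24576, 49152, 98304,
--           196608, 393216, 786432, 1572864, 3145728, 6291456, 12582912, 25165824, 50331648,
--           100663296, 201326592, 402653184, 805306368, 1610612736]
--
-- def map_coord(x, y):
--     u = x - 1
--     v = abs((y - 1) * 2 - (x - 1))
--     return u, v
--
-- def is_below_or_on_line(u, v, b):
--     return v <= -u + b
--
-- def find_interval(number):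
--     for i in range(len(values) - 1):
--         if values[i] <= number < values[i + 1]:
--             return (values[i], values[i + 1])
--     return None
--
-- def sierpinski(x, y, depth=0):
--     if x < 3:
--         return 1
--     elif x in values:
--         return 0
--     else:
--         interval = find_interval(x)
--         u, v = map_coord(x, y)
--         if is_below_or_on_line(u, v, interval[1]-1):
--             return 0
--         else:
--             if y > interval[0]:
--                 return sierpinski(x - interval[0], abs(y - interval[0]), depth + 1)
--             else:
--                 return sierpinski(x - interval[0], y, depth + 1)
-- ===== SOURCE B (Python) =====
-- def sierpinski(x, y, depth=0):
--     # Iterative: find the enclosing band by doubling from 3; no table, no helpers, no recursion.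
--     while x >= 3:
--         lo = 3
--         while lo * 2 <= x:
--             lo *= 2
--         if x == lo:
--             return 0
--         if abs(2 * y - x - 1) <= lo * 2 - x:
--             return 0
--         x -= lo
--         if y > lo:
--             y -= lo
--     return 1
-- ===== Notes on version B (the rewrite author's own statement) =====
-- stated objective: simpler
-- what changed: Replaces the tail recursion plus the hard-coded 30-entry values table with linear scans (membership test and find_interval) by a single iterative while loop that computes the enclosing band 3*2^k by doubling and rebinds x,y in place.
-- crash fix: For x > 1610612736 (beyond the values table) A's find_interval returns None and A raises TypeError on interval[1]; B's doubling loop needs no table and returns the cell value (1 at the witness). — e.g. on sierpinski(1610612737, 1, 0): A raises TypeError, B returns 1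
import Mathlib
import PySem

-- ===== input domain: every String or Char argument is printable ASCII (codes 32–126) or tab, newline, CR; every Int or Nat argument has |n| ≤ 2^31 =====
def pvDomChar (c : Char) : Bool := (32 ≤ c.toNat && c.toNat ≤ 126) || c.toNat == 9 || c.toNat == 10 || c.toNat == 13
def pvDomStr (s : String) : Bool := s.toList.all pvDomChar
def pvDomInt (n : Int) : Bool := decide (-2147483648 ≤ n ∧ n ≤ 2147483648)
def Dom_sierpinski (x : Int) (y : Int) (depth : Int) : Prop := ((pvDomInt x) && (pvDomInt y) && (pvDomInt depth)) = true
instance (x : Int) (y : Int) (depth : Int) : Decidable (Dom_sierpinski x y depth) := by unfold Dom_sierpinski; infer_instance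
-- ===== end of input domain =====

-- B replaces A's tail recursion and hard-coded values table (scanned by `in` and find_interval)
-- with one iterative loop that finds the enclosing band 3*2^k by doubling; objective: simpler.

-- ===== PORT A =====
def pyValues : List Int := [3, 6, 12, 24, 48, 96, 192, 384, 768, 1536, 3072, 6144, 12288, 24576,
  49152, 98304, 196608, 393216, 786432, 1572864, 3145728, 6291456, 12582912, 25165824, 50331648,
  100663296, 201326592, 402653184, 805306368, 1610612736]

def mapCoord (x y : Int) : Int × Int := (x - 1, |(y - 1) * 2 - (x - 1)|)

def isBelowOrOnLine (u v b : Int) : Bool := decide (v ≤ -u + b)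

-- Python's index loop over adjacent pairs values[i], values[i+1], same traversal order
def findIntervalAux (n : Int) : List Int → Option (Int × Int)
  | a :: b :: rest => if a ≤ n ∧ n < b then some (a, b) else findIntervalAux n (b :: rest)
  | _ => none

def findInterval (n : Int) : Option (Int × Int) := findIntervalAux n pyValues

-- cited by sierpinski's decreasing_by
theorem findAux_mem (n : Int) (L : List Int) (lo hi : Int)
    (h : findIntervalAux n L = some (lo, hi)) : lo ∈ L ∧ lo ≤ n := by
  induction L with
  | nil => simp [findIntervalAux] at h
  | cons a t ih =>
    cases t with
    | nil => simp [findIntervalAux] at h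
    | cons b r =>
      simp only [findIntervalAux] at h
      split_ifs at h with hc
      · obtain ⟨rfl, rfl⟩ : a = lo ∧ b = hi := by simpa using h
        exact ⟨List.mem_cons_self, hc.1⟩
      · obtain ⟨h1, h2⟩ := ih h
        exact ⟨List.mem_cons_of_mem _ h1, h2⟩

-- cited by sierpinski's decreasing_by
theorem values_ge3 : ∀ a ∈ pyValues, (3 : Int) ≤ a := by decide

def sierpinski (x : Int) (y : Int) (depth : Int) : Int :=
  if x < 3 then 1
  else if hmem : x ∈ pyValues then 0
  else
    match hfind : findInterval x with
    | none => 0   -- Python raises TypeError here (interval[1] with interval = None); excluded by Pre_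
    | some (lo, hi) =>
      let uv := mapCoord x y
      if isBelowOrOnLine uv.1 uv.2 (hi - 1) then 0
      else if y > lo then sierpinski (x - lo) |y - lo| (depth + 1)
      else sierpinski (x - lo) y (depth + 1)
termination_by x.toNat
decreasing_by
  · obtain ⟨hm, hle⟩ := findAux_mem x pyValues lo hi hfind
    have h3 := values_ge3 lo hm
    have hne : lo ≠ x := fun h => hmem (h ▸ hm)
    omega
  · obtain ⟨hm, hle⟩ := findAux_mem x pyValues lo hi hfind
    have h3 := values_ge3 lo hm
    have hne : lo ≠ x := fun h => hmem (h ▸ hm)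
    omega

-- ===== PORT B =====
-- inner `while lo*2 <= x: lo *= 2`; fuel 64 is a pure totaliser, never exhausted for |x| ≤ 2^31
def lowDouble (fuel : Nat) (x lo : Int) : Int :=
  match fuel with
  | 0 => lo
  | f + 1 => if lo * 2 ≤ x then lowDouble f x (lo * 2) else lo

-- cited by sierpinski_alt's decreasing_by
theorem lowDouble_ge (f : Nat) (x lo : Int) (h : 0 < lo) : lo ≤ lowDouble f x lo := by
  induction f generalizing lo with
  | zero => simp [lowDouble]
  | succ f ih =>
    simp only [lowDouble]
    split_ifs with hc
    · have := ih (lo * 2) (by omega); omega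
    · omega

-- cited by sierpinski_alt's decreasing_by
theorem lowDouble_le (f : Nat) (x lo : Int) (h : lo ≤ x) : lowDouble f x lo ≤ x := by
  induction f generalizing lo with
  | zero => simpa [lowDouble]
  | succ f ih =>
    simp only [lowDouble]
    split_ifs with hc
    · exact ih (lo * 2) hc
    · exact h

def sierpinski_alt (x : Int) (y : Int) (depth : Int) : Int :=
  if hx : x < 3 then 1
  else
    let lo := lowDouble 64 x 3
    if hlo : x = lo then 0
    else if |2 * y - x - 1| ≤ lo * 2 - x then 0
    else sierpinski_alt (x - lo) (if y > lo then y - lo else y) depth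
termination_by x.toNat
decreasing_by
  have h1 : (3 : Int) ≤ lowDouble 64 x 3 := lowDouble_ge 64 x 3 (by omega)
  have h2 : lowDouble 64 x 3 ≤ x := lowDouble_le 64 x 3 (by omega)
  simp only [lo] at hlo ⊢
  omega

-- ===== PRECONDITION & SPEC =====
-- Pre_ excludes exactly the inputs where A raises: for x > 1610612736 find_interval
-- returns None and A fails with TypeError on interval[1].
def Pre_sierpinski (x : Int) (y : Int) (depth : Int) : Prop := x ≤ 1610612736
instance (x : Int) (y : Int) (depth : Int) : Decidable (Pre_sierpinski x y depth) := by unfold Pre_sierpinski; infer_instance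

def pvWitness_sierpinski : Int × Int × Int := (10, 4, 0)

-- For x > 1610612736 A's find_interval returns None and A raises TypeError; B needs no table and returns the cell value.
def Raises_sierpinski (x : Int) (y : Int) (depth : Int) : Prop := 1610612736 < x
instance (x : Int) (y : Int) (depth : Int) : Decidable (Raises_sierpinski x y depth) := by unfold Raises_sierpinski; infer_instance
def pvRaiseWitness_sierpinski : Int × Int × Int := (1610612737, 1, 0)
def pvRaiseWitnessOut_sierpinski : Int := 1

def Spec_sierpinski (x : Int) (y : Int) (depth : Int) (out : Int) : Prop := out = sierpinski_alt x y depth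
instance (x : Int) (y : Int) (depth : Int) (out : Int) : Decidable (Spec_sierpinski x y depth out) := by unfold Spec_sierpinski; infer_instance

-- ===== CLAIM (what is proved, stated in full; the proofs are below) =====
def Claim_equal_sierpinski : Prop := ∀ (x : Int) (y : Int) (depth : Int), Dom_sierpinski x y depth → Pre_sierpinski x y depth → Spec_sierpinski x y depth (sierpinski x y depth)
def Claim_raises_sierpinski : Prop := (∀ (x : Int) (y : Int) (depth : Int), Dom_sierpinski x y depth → Raises_sierpinski x y depth → ¬ Pre_sierpinski x y depth) ∧ (Dom_sierpinski (pvRaiseWitness_sierpinski.1) (pvRaiseWitness_sierpinski.2.1) (pvRaiseWitness_sierpinski.2.2) ∧ Raises_sierpinski (pvRaiseWitness_sierpinski.1) (pvRaiseWitness_sierpinski.2.1) (pvRaiseWitness_sierpinski.2.2) ∧ sierpinski_alt (pvRaiseWitness_sierpinski.1) (pvRaiseWitness_sierpinski.2.1) (pvRaiseWitness_sierpinski.2.2) = pvRaiseWitnessOut_sierpinski)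

-- ===== LEMMAS AND PROOFS =====

theorem lowDouble_pow (f : Nat) (x lo : Int) : ∃ k : Nat, lowDouble f x lo = 2 ^ k * lo := by
  induction f generalizing lo with
  | zero => exact ⟨0, by simp [lowDouble]⟩
  | succ f ih =>
    simp only [lowDouble]
    split_ifs with hc
    · obtain ⟨k, hk⟩ := ih (lo * 2)
      exact ⟨k + 1, by rw [hk]; ring⟩
    · exact ⟨0, by simp⟩

theorem lowDouble_lt2 (f : Nat) (x lo : Int) (h : x < 2 ^ f * lo) (h0 : 0 < lo) :
    x < 2 * lowDouble f x lo := by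
  induction f generalizing lo with
  | zero =>
    simp only [lowDouble]
    simp only [pow_zero, one_mul] at h
    omega
  | succ f ih =>
    simp only [lowDouble]
    split_ifs with hc
    · exact ih (lo * 2) (by rw [pow_succ] at h; linarith) (by omega)
    · omega

theorem pairUniq : ∀ a ∈ pyValues, ∀ b ∈ pyValues, a < 2 * b → b < 2 * a → a = b := by decide

theorem pow_le_29 (k : Nat) (h : (2 : Int) ^ k ≤ 2 ^ 29) : k ≤ 29 := by
  by_contra hk
  have h30 : (2 : Int) ^ 30 ≤ 2 ^ k := pow_le_pow_right₀ (by norm_num) (by omega)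
  have h29 : ((2 : Int) ^ 29) < 2 ^ 30 := by norm_num
  linarith

theorem threePow_mem (k : Nat) (hk : k ≤ 29) : ((3 * 2 ^ k : Int)) ∈ pyValues := by
  interval_cases k <;> decide

theorem low_mem (x : Int) (h3 : 3 ≤ x) (hb : x ≤ 1610612736) :
    lowDouble 64 x 3 ∈ pyValues ∧ 3 ≤ lowDouble 64 x 3 ∧ lowDouble 64 x 3 ≤ x ∧
      x < 2 * lowDouble 64 x 3 := by
  obtain ⟨k, hk⟩ := lowDouble_pow 64 x 3
  have hge := lowDouble_ge 64 x 3 (by norm_num)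
  have hle := lowDouble_le 64 x 3 h3
  have hbig : (1610612736 : Int) < 2 ^ 64 * 3 := by norm_num
  have hlt : x < 2 * lowDouble 64 x 3 := lowDouble_lt2 64 x 3 (by omega) (by norm_num)
  have hk29 : k ≤ 29 := by
    apply pow_le_29
    have h1 : (2 : Int) ^ k * 3 ≤ 1610612736 := by rw [← hk]; omega
    have h2 : (1610612736 : Int) = 2 ^ 29 * 3 := by norm_num
    linarith
  have hm : lowDouble 64 x 3 ∈ pyValues := by
    rw [hk, mul_comm]; exact threePow_mem k hk29
  exact ⟨hm, hge, hle, hlt⟩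

theorem chain_head_le (a : Int) (L : List Int)
    (hc : List.IsChain (fun p q => q = 2 * p) (a :: L)) (ha : 0 < a) :
    ∀ b ∈ a :: L, a ≤ b := by
  induction L generalizing a with
  | nil => intro b hb; simp at hb; omega
  | cons c r ih =>
    intro b hb
    obtain ⟨hca, hc'⟩ := List.isChain_cons_cons.mp hc
    rcases List.mem_cons.mp hb with rfl | hb'
    · exact le_rfl
    · have := ih c hc' (by omega) b hb'
      omega

theorem findAux_eq (x l : Int) : ∀ L : List Int,
    List.IsChain (fun p q => q = 2 * p) L → (∀ a ∈ L, 0 < a) →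
    l ∈ L → 2 * l ∈ L → l ≤ x → x < 2 * l →
    findIntervalAux x L = some (l, 2 * l) := by
  intro L
  induction L with
  | nil => intro _ _ hl _ _ _; simp at hl
  | cons a t ih =>
    cases t with
    | nil =>
      intro _ hpos hl h2l _ _
      simp only [List.mem_singleton] at hl h2l
      have := hpos a List.mem_cons_self
      omega
    | cons b r =>
      intro hc hpos hl h2l h1 h2
      obtain ⟨hba, hc'⟩ := List.isChain_cons_cons.mp hc
      have hpa : 0 < a := hpos a List.mem_cons_self
      have hpl : 0 < l := hpos l hl
      simp only [findIntervalAux]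
      split_ifs with hcond
      · have hla : l = a := by
          rcases List.mem_cons.mp hl with rfl | hl'
          · rfl
          · have := chain_head_le b r hc' (by omega) l hl'
            omega
        subst hla
        rw [hba]
      · apply ih hc' (fun c hcm => hpos c (List.mem_cons_of_mem _ hcm)) ?_ ?_ h1 h2
        · rcases List.mem_cons.mp hl with rfl | hl'
          · exfalso; omega
          · exact hl'
        · rcases List.mem_cons.mp h2l with h2l' | h2l'
          · exfalso
            have := chain_head_le a (b :: r) hc hpa l hl
            omega
          · exact h2l'

theorem find_eq (x l : Int) (hl : l ∈ pyValues) (h1 : l ≤ x) (h2 : x < 2 * l)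
    (hx : x < 1610612736) : findInterval x = some (l, 2 * l) := by
  have h2l : 2 * l ∈ pyValues :=
    (by decide : ∀ a ∈ pyValues, a < 1610612736 → 2 * a ∈ pyValues) l hl (by omega)
  exact findAux_eq x l pyValues (by decide) (by decide) hl h2l h1 h2

theorem main_ind (n : Nat) : ∀ x y depth depth' : Int, x.toNat ≤ n → x ≤ 1610612736 →
    sierpinski x y depth = sierpinski_alt x y depth' := by
  induction n with
  | zero =>
    intro x y d d' hx _
    have h3 : x < 3 := by omega
    rw [sierpinski, sierpinski_alt]
    simp [h3]
  | succ n ih =>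
    intro x y d d' hx hb
    rw [sierpinski, sierpinski_alt]
    by_cases h3 : x < 3
    · simp [h3]
    · obtain ⟨hmem, hge, hle, hlt⟩ := low_mem x (by omega) hb
      by_cases hm : x ∈ pyValues
      · have hx_l : x = lowDouble 64 x 3 :=
          pairUniq x hm _ hmem (by omega) (by omega)
        simp only [if_neg h3, dif_neg h3, dif_pos hm, dif_pos hx_l]
      · have hxlt : x < 1610612736 := by
          have hne : x ≠ 1610612736 :=
            fun h => hm (h ▸ (by decide : (1610612736 : Int) ∈ pyValues))
          omega
        have hne : x ≠ lowDouble 64 x 3 := fun h => hm (h ▸ hmem)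
        have hf : findInterval x = some (lowDouble 64 x 3, 2 * lowDouble 64 x 3) :=
          find_eq x _ hmem hle hlt hxlt
        simp only [if_neg h3, dif_neg h3, dif_neg hm, dif_neg hne, mapCoord,
          isBelowOrOnLine, decide_eq_true_eq]
        split
        · rename_i heq; rw [hf] at heq; exact absurd heq (by simp)
        · rename_i lo hi heq
          rw [hf] at heq
          obtain ⟨rfl, rfl⟩ : lowDouble 64 x 3 = lo ∧ 2 * lowDouble 64 x 3 = hi := by
            simpa using heq
          have habs : (y - 1) * 2 - (x - 1) = 2 * y - x - 1 := by ring
          have hrhs : -(x - 1) + (2 * lowDouble 64 x 3 - 1) = lowDouble 64 x 3 * 2 - x := by ring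
          rw [habs, hrhs]
          by_cases hc : |2 * y - x - 1| ≤ lowDouble 64 x 3 * 2 - x
          · simp [hc]
          · simp only [if_neg hc]
            by_cases hy : y > lowDouble 64 x 3
            · rw [if_pos hy, if_pos hy, abs_of_nonneg (by omega : (0:Int) ≤ y - lowDouble 64 x 3)]
              exact ih (x - lowDouble 64 x 3) _ _ _ (by omega) (by omega)
            · rw [if_neg hy, if_neg hy]
              exact ih (x - lowDouble 64 x 3) _ _ _ (by omega) (by omega)

theorem alt_raise_witness : sierpinski_alt 1610612737 1 0 = 1 := by
  have hl : lowDouble 64 1610612737 3 = 1610612736 := by decide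
  rw [sierpinski_alt]
  simp only [hl]
  norm_num
  rw [sierpinski_alt]
  norm_num

-- ===== VERDICT (by name: the statement is the Claim_ definition above) =====
theorem sierpinski_spec : Claim_equal_sierpinski := by
  intro x y d _ hp
  exact main_ind x.toNat x y d d le_rfl hp

@[simp] theorem sierpinski_raises : Claim_raises_sierpinski := by
  unfold Claim_raises_sierpinski
  refine ⟨fun x y d _ hr hp => ?_, by decide, by decide, alt_raise_witness⟩
  unfold Raises_sierpinski at hr; unfold Pre_sierpinski at hp; omega
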